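-- pv_equiv track=rewrite | github.com/alvarocaceresmunoz/GroovePass | src/processing.py | removeSilenceAfterLastPeak
-- ===== SOURCE A (Python) =====
-- def removeSilenceAfterLastPeak(peaks):
--     silenceAtTheEnd = False
--     checkingSilenceAtTail = True
--
--     if peaks[-1] == False:
--         silences = 0
--         for peak in peaks[::-1]:
--             silences += 1
--             if peak:
--                 break
--         result = peaks[:len(peaks)-silences+1]
--     else:
--         result = peaks
--
--     return result
-- ===== SOURCE B (Python) =====
-- def removeSilenceAfterLastPeak(peaks):
--     if peaks[-1] == False:
--         last = 0
--         for i, peak in enumerate(peaks):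
--             if peak:
--                 last = i
--         return peaks[:last + 1]
--     return peaks
-- ===== Notes on version B (the rewrite author's own statement) =====
-- stated objective: simpler
-- what changed: Replaced the reversed-copy backward scan that counts trailing silences with a single forward enumerate pass tracking the index of the last truthy element, then one slice.
import Mathlib
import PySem

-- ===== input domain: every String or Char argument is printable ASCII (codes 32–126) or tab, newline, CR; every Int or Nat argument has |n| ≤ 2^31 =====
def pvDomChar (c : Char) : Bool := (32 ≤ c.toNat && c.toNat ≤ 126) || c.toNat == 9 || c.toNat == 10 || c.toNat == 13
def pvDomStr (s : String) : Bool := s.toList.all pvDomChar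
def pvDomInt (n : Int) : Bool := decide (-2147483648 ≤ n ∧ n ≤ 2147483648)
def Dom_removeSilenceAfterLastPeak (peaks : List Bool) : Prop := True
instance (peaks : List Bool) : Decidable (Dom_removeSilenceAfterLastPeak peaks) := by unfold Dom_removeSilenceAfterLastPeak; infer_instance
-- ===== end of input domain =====

-- B replaces A's reversed-copy backward silence count with a single forward pass
-- tracking the last truthy index (objective: simpler). Equality of the RETURN value
-- is proved for nonempty input; both Pythons raise IndexError on [].

-- ===== PORT A =====
-- the 'for peak in peaks[::-1]: silences += 1; if peak: break' loop
def pvSilences : List Bool → Int → Int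
  | [], s => s
  | p :: rest, s => if p then s + 1 else pvSilences rest (s + 1)

def removeSilenceAfterLastPeak (peaks : List Bool) : List Bool :=
  match PySem.List.pyGet? peaks (-1) with
  | none => []   -- peaks[-1] raises IndexError; excluded by Pre_
  | some lastElem =>
    if lastElem = false then
      let rev := (PySem.List.slice? peaks none none (-1)).getD []   -- peaks[::-1]
      let silences := pvSilences rev 0
      PySem.List.slice peaks none (some ((peaks.length : Int) - silences + 1))  -- peaks[:len-silences+1]
    else peaks

-- ===== PORT B =====
def removeSilenceAfterLastPeak_alt (peaks : List Bool) : List Bool :=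
  match PySem.List.pyGet? peaks (-1) with
  | none => []   -- peaks[-1] raises IndexError; excluded by Pre_
  | some lastElem =>
    if lastElem = false then
      let last := (PySem.List.enumerate peaks 0).foldl
        (fun acc p => if p.2 then p.1 else acc) 0
      PySem.List.slice peaks none (some (last + 1))   -- peaks[:last+1]
    else peaks

-- ===== PRECONDITION & SPEC =====
-- Pre_ excludes only the empty list, on which both A and B raise IndexError at peaks[-1].
def Pre_removeSilenceAfterLastPeak (peaks : List Bool) : Prop := peaks ≠ []
instance (peaks : List Bool) : Decidable (Pre_removeSilenceAfterLastPeak peaks) := by unfold Pre_removeSilenceAfterLastPeak; infer_instance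
def pvWitness_removeSilenceAfterLastPeak : List Bool := [true, false]

def Spec_removeSilenceAfterLastPeak (peaks : List Bool) (out : List Bool) : Prop := out = removeSilenceAfterLastPeak_alt peaks
instance (peaks : List Bool) (out : List Bool) : Decidable (Spec_removeSilenceAfterLastPeak peaks out) := by unfold Spec_removeSilenceAfterLastPeak; infer_instance

-- ===== CLAIM (what is proved, stated in full; the proofs are below) =====
def Claim_equal_removeSilenceAfterLastPeak : Prop := ∀ (peaks : List Bool), Dom_removeSilenceAfterLastPeak peaks → Pre_removeSilenceAfterLastPeak peaks → Spec_removeSilenceAfterLastPeak peaks (removeSilenceAfterLastPeak peaks)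

-- ===== LEMMAS AND PROOFS =====

theorem pvSilences_shift (l : List Bool) (s : Int) :
    pvSilences l s = s + pvSilences l 0 := by
  induction l generalizing s with
  | nil => simp [pvSilences]
  | cons p r ih =>
    simp only [pvSilences]
    by_cases hp : p = true
    · simp [hp]
    · simp only [Bool.not_eq_true] at hp
      simp [hp, ih (s + 1), ih 1]; ring

-- the two slice bounds agree: len - silences(reverse) = last truthy index (0 if none)
theorem pvBound_eq (peaks : List Bool) :
    (peaks.length : Int) - pvSilences peaks.reverse 0 =
      (PySem.List.enumerate peaks 0).foldl (fun acc p => if p.2 then p.1 else acc) 0 := by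
  induction peaks using List.reverseRecOn with
  | nil => simp [pvSilences]
  | append_singleton l x ih =>
    rw [List.reverse_append]
    simp only [List.reverse_singleton, List.singleton_append, pvSilences,
      PySem.List.enumerate_append, List.foldl_append, PySem.List.enumerate_cons,
      PySem.List.enumerate_nil, List.foldl_cons, List.foldl_nil, List.length_append,
      List.length_singleton]
    by_cases hx : x = true
    · simp [hx]
    · simp only [Bool.not_eq_true] at hx
      rw [pvSilences_shift]
      simp [hx, ← ih]
      ring

theorem removeSilence_spec_aux (peaks : List Bool) (h : peaks ≠ []) :
    removeSilenceAfterLastPeak peaks = removeSilenceAfterLastPeak_alt peaks := by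
  unfold removeSilenceAfterLastPeak removeSilenceAfterLastPeak_alt
  rw [PySem.List.pyGet?_neg_one]
  rcases List.getLast?_eq_some_iff.mpr ⟨_, (List.dropLast_append_getLast h).symm⟩ with hl
  rw [hl]
  by_cases hb : peaks.getLast h = false
  · rw [hb]
    rw [PySem.List.slice?_none_none_neg_one, Option.getD_some, ← pvBound_eq peaks]
  · simp only [Bool.not_eq_false] at hb
    rw [hb]
    simp

-- ===== VERDICT (by name: the statement is the Claim_ definition above) =====
theorem removeSilenceAfterLastPeak_spec : Claim_equal_removeSilenceAfterLastPeak := by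
  intro peaks _ hpre
  exact removeSilence_spec_aux peaks hpre
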